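-- pv_equiv track=rewrite | github.com/linhdvu14/cp-sols | sols/CodeForces/1864_d12_harbourspace/B_Swap_and_Reverse.py | solve
-- ===== SOURCE A (Python) =====
-- def solve(N, K, S):
--     S = list(S)
--
--     if K % 2 == 0:
--         S.sort()
--     else:
--         P = sorted(S[i] for i in range(0, N, 2))
--         Q = sorted(S[i] for i in range(1, N, 2))
--         S = [a + b for a, b in zip(P, Q)]
--         if N % 2: S += [P[-1]]
--
--     return S
-- ===== SOURCE B (Python) =====
-- def _bucket(chars):
--     # counting ("bucket") sort over the fixed ASCII alphabet
--     return [chr(v) for v in range(128) for _ in range(chars.count(chr(v)))]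
--
--
-- def solve(N, K, S):
--     T = list(S)
--     if K % 2 == 0:
--         return _bucket(T)
--     E = [T[i] for i in range(0, N, 2)]
--     O = [T[i] for i in range(1, N, 2)]
--     P = _bucket(E)
--     Q = _bucket(O)
--     res = [p + q for p, q in zip(P, Q)]
--     if N % 2:
--         res.append(P[-1])
--     return res
-- ===== Notes on version B (the rewrite author's own statement) =====
-- stated objective: alternative
-- what changed: The comparison sorts (list.sort / sorted) are replaced by a counting (bucket) sort over the fixed 128-character ASCII alphabet, concatenating buckets in code order.
import Mathlib
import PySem

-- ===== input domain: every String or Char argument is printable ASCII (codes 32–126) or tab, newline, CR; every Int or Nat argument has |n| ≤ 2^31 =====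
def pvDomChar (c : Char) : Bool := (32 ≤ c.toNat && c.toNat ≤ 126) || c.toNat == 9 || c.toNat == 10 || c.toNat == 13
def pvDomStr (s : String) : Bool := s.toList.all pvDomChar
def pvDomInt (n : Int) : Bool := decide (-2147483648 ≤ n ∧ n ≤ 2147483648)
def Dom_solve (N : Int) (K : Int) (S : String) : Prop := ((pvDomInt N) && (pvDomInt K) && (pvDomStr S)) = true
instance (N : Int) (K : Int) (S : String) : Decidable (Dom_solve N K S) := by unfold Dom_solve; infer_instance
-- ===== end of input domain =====

-- B replaces Python's comparison sorts by a counting ("bucket") sort over the fixed 128-character ASCII alphabet (objective: alternative algorithm).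

-- ===== PORT A =====
-- a Python 1-character string (an element of list(S))
def pvMk1 (c : Char) : String := String.ofList [c]
-- Python 'a + b' on str; exact: concatenation of the code-point lists
def pvCat (a b : String) : String := String.ofList (a.toList ++ b.toList)

def solve (N : Int) (K : Int) (S : String) : List String :=
  let Sl : List String := S.toList.map pvMk1
  if PySem.Int.mod K 2 = 0 then
    PySem.List.sorted Sl (fun x => x)
  else
    let P := PySem.List.sorted ((PySem.List.pyRange 0 N 2).map (fun i => PySem.List.pyGetD Sl i "")) (fun x => x)
    let Q := PySem.List.sorted ((PySem.List.pyRange 1 N 2).map (fun i => PySem.List.pyGetD Sl i "")) (fun x => x)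
    let S2 := (P.zip Q).map (fun ab => pvCat ab.1 ab.2)
    if PySem.Int.mod N 2 ≠ 0 then S2 ++ [PySem.List.pyGetD P (-1) ""] else S2

-- ===== PORT B =====
-- B's helper _bucket: counting sort over the 128 ASCII codes
def pvBucket (l : List String) : List String :=
  (PySem.List.pyRange 0 128 1).flatMap (fun v =>
    List.replicate (PySem.List.count l (pvMk1 (Char.ofNat v.toNat))) (pvMk1 (Char.ofNat v.toNat)))

def solve_alt (N : Int) (K : Int) (S : String) : List String :=
  let T : List String := S.toList.map pvMk1
  if PySem.Int.mod K 2 = 0 then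
    pvBucket T
  else
    let E := (PySem.List.pyRange 0 N 2).map (fun i => PySem.List.pyGetD T i "")
    let O := (PySem.List.pyRange 1 N 2).map (fun i => PySem.List.pyGetD T i "")
    let P := pvBucket E
    let Q := pvBucket O
    let res := (P.zip Q).map (fun ab => pvCat ab.1 ab.2)
    if PySem.Int.mod N 2 ≠ 0 then res ++ [PySem.List.pyGetD P (-1) ""] else res

-- ===== PRECONDITION & SPEC =====
-- Pre_ excludes exactly the inputs where A raises an IndexError: with K odd, either
-- N > len(S) (some index S[i], i < N, is out of range) or N is odd and N ≤ 0 (P is empty and P[-1] raises).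
def Pre_solve (N : Int) (K : Int) (S : String) : Prop :=
  PySem.Int.mod K 2 = 0 ∨ (N ≤ PySem.Str.len S ∧ (PySem.Int.mod N 2 = 1 → 0 < N))
instance (N : Int) (K : Int) (S : String) : Decidable (Pre_solve N K S) := by unfold Pre_solve; infer_instance
def pvWitness_solve : Int × Int × String := (3, 1, "bca")

def Spec_solve (N : Int) (K : Int) (S : String) (out : List String) : Prop := out = solve_alt N K S
instance (N : Int) (K : Int) (S : String) (out : List String) : Decidable (Spec_solve N K S out) := by unfold Spec_solve; infer_instance

-- ===== CLAIM (what is proved, stated in full; the proofs are below) =====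
def Claim_equal_solve : Prop := ∀ (N : Int) (K : Int) (S : String), Dom_solve N K S → Pre_solve N K S → Spec_solve N K S (solve N K S)

-- ===== LEMMAS AND PROOFS =====

lemma pvMk1_inj {a b : Char} (h : pvMk1 a = pvMk1 b) : a = b := by
  have := congrArg String.toList h
  simpa [pvMk1] using this

lemma pvMk1_lt {a b : Char} (h : a < b) : pvMk1 a < pvMk1 b := by
  rw [pvMk1, pvMk1, String.lt_iff_toList_lt]
  simp [List.cons_lt_cons_iff, h]

lemma pvMk1_le {a b : Char} (h : a ≤ b) : pvMk1 a ≤ pvMk1 b := by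
  rcases lt_or_eq_of_le h with h' | h'
  · exact le_of_lt (pvMk1_lt h')
  · exact le_of_eq (by rw [h'])

lemma char_ofNat_toNat_int {v : Int} (h0 : 0 ≤ v) (h1 : v < 128) :
    (Char.ofNat v.toNat).toNat = v.toNat := by
  rw [Char.toNat_ofNat]
  have : v.toNat.isValidChar := Or.inl (by omega)
  simp [this]

lemma count_flatMap_zero {vs : List Int} {f : Int → List String} {a : String}
    (h : ∀ v ∈ vs, a ∉ f v) : (vs.flatMap f).count a = 0 := by
  rw [List.count_eq_zero]
  intro hmem
  rcases List.mem_flatMap.mp hmem with ⟨v, hv, ha⟩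
  exact h v hv ha

lemma count_pvBucket (l : List String) (a : String)
    (h : ∀ s ∈ l, ∃ c : Char, c.toNat < 128 ∧ s = pvMk1 c) :
    (pvBucket l).count a = l.count a := by
  by_cases ha : ∃ c : Char, c.toNat < 128 ∧ a = pvMk1 c
  · rcases ha with ⟨c, hc, rfl⟩
    have hsplit : PySem.List.pyRange 0 128 1 =
        PySem.List.pyRange 0 (c.toNat : Int) 1 ++
          ((c.toNat : Int) :: PySem.List.pyRange ((c.toNat : Int) + 1) 128 1) :=
      (PySem.List.pyRange_one_append 0 (c.toNat : Int) 128 (by positivity) (by exact_mod_cast hc.le)).trans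
        (by rw [PySem.List.pyRange_one_cons (a := (c.toNat : Int)) (b := 128) (by exact_mod_cast hc)])
    have hne : ∀ v : Int, 0 ≤ v → v < 128 → v ≠ (c.toNat : Int) →
        pvMk1 c ∉ List.replicate (PySem.List.count l (pvMk1 (Char.ofNat v.toNat))) (pvMk1 (Char.ofNat v.toNat)) := by
      intro v h0 h1 hv hmem
      have := List.eq_of_mem_replicate hmem
      have hcv : c = Char.ofNat v.toNat := pvMk1_inj this
      have : c.toNat = v.toNat := by rw [hcv, char_ofNat_toNat_int h0 h1]
      omega
    rw [pvBucket, hsplit, List.flatMap_append, List.count_append, List.flatMap_cons, List.count_append]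
    have hz1 : (List.flatMap (fun v =>
        List.replicate (PySem.List.count l (pvMk1 (Char.ofNat v.toNat))) (pvMk1 (Char.ofNat v.toNat)))
        (PySem.List.pyRange 0 (c.toNat : Int) 1)).count (pvMk1 c) = 0 := by
      apply count_flatMap_zero
      intro v hv
      rcases (PySem.List.mem_pyRange_one).mp hv with ⟨h0, h1⟩
      exact hne v h0 (by omega) (by omega)
    have hz2 : (List.flatMap (fun v =>
        List.replicate (PySem.List.count l (pvMk1 (Char.ofNat v.toNat))) (pvMk1 (Char.ofNat v.toNat)))
        (PySem.List.pyRange ((c.toNat : Int) + 1) 128 1)).count (pvMk1 c) = 0 := by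
      apply count_flatMap_zero
      intro v hv
      rcases (PySem.List.mem_pyRange_one).mp hv with ⟨h0, h1⟩
      exact hne v (by omega) h1 (by omega)
    have hmid : Char.ofNat ((c.toNat : Int)).toNat = c := by
      rw [Int.toNat_natCast]; exact Char.ofNat_toNat c
    rw [hz1, hz2, hmid, PySem.List.count_eq, List.count_replicate_self]
    omega
  · have h1 : l.count a = 0 := by
      rw [List.count_eq_zero]
      intro hmem
      exact ha (h a hmem)
    have h2 : (pvBucket l).count a = 0 := by
      apply count_flatMap_zero
      intro v hv hmem
      rcases (PySem.List.mem_pyRange_one).mp hv with ⟨h0, h1'⟩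
      have := List.eq_of_mem_replicate hmem
      exact ha ⟨Char.ofNat v.toNat, by rw [char_ofNat_toNat_int h0 h1']; omega, this⟩
    rw [h1, h2]

lemma pvBucket_perm (l : List String)
    (h : ∀ s ∈ l, ∃ c : Char, c.toNat < 128 ∧ s = pvMk1 c) : (pvBucket l).Perm l := by
  rw [List.perm_iff_count]
  intro a
  exact count_pvBucket l a h

lemma pvBucket_pairwise (l : List String) :
    (pvBucket l).Pairwise (fun a b => a ≤ b) := by
  rw [pvBucket, List.flatMap_def, List.pairwise_flatten]
  constructor
  · intro l' hl'
    rcases List.mem_map.mp hl' with ⟨v, _, rfl⟩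
    exact List.pairwise_replicate.mpr (Or.inr le_rfl)
  · rw [List.pairwise_map]
    have hp := (List.Pairwise.and_mem).mp (PySem.List.pairwise_lt_pyRange_one 0 128)
    refine hp.imp ?_
    rintro v w ⟨hv, hw, hvw⟩ x hx y hy
    rcases (PySem.List.mem_pyRange_one).mp hv with ⟨hv0, hv1⟩
    rcases (PySem.List.mem_pyRange_one).mp hw with ⟨hw0, hw1⟩
    rw [List.eq_of_mem_replicate hx, List.eq_of_mem_replicate hy]
    apply pvMk1_le
    apply le_of_lt
    have h1 : (Char.ofNat v.toNat).toNat = v.toNat := char_ofNat_toNat_int hv0 hv1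
    have h2 : (Char.ofNat w.toNat).toNat = w.toNat := char_ofNat_toNat_int hw0 hw1
    have : (Char.ofNat v.toNat).toNat < (Char.ofNat w.toNat).toNat := by omega
    exact Char.lt_def.mpr (by exact_mod_cast this)

lemma sorted_eq_pvBucket (l : List String)
    (h : ∀ s ∈ l, ∃ c : Char, c.toNat < 128 ∧ s = pvMk1 c) :
    PySem.List.sorted l (fun x => x) = pvBucket l :=
  PySem.List.sorted_id_eq_of_perm_of_pairwise l (pvBucket l) (pvBucket_perm l h) (pvBucket_pairwise l)

lemma dom_chars {S : String} (hD : Dom_solve N K S) :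
    ∀ s ∈ S.toList.map pvMk1, ∃ c : Char, c.toNat < 128 ∧ s = pvMk1 c := by
  intro s hs
  rcases List.mem_map.mp hs with ⟨c, hc, rfl⟩
  refine ⟨c, ?_, rfl⟩
  unfold Dom_solve pvDomStr at hD
  simp only [Bool.and_eq_true, List.all_eq_true] at hD
  have := hD.2 c hc
  unfold pvDomChar at this
  simp only [Bool.or_eq_true, Bool.and_eq_true, decide_eq_true_eq, beq_iff_eq] at this
  omega

-- ===== VERDICT (by name: the statement is the Claim_ definition above) =====
theorem solve_spec : Claim_equal_solve := by
  intro N K S hD hP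
  unfold Spec_solve solve solve_alt
  have hT := dom_chars (N := N) (K := K) hD
  by_cases hK : PySem.Int.mod K 2 = 0
  · simp only [hK, if_true]
    exact sorted_eq_pvBucket _ hT
  · simp only [hK, if_false]
    have hlen : N ≤ (S.toList.length : Int) := by
      rcases hP with hP | hP
      · exact absurd hP hK
      · simpa [PySem.Str.len_eq] using hP.1
    have hmem : ∀ a : Int, ∀ i ∈ PySem.List.pyRange a N 2, 0 ≤ a →
        PySem.List.pyGetD (S.toList.map pvMk1) i "" ∈ S.toList.map pvMk1 := by
      intro a i hi ha
      rcases (PySem.List.mem_pyRange_iff_of_pos (by norm_num) i).mp hi with ⟨h0, h1, _⟩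
      apply PySem.List.pyGetD_mem
      rw [PySem.Raise.InRange, List.length_map]
      omega
    have hE : ∀ s ∈ (PySem.List.pyRange 0 N 2).map (fun i => PySem.List.pyGetD (S.toList.map pvMk1) i ""),
        ∃ c : Char, c.toNat < 128 ∧ s = pvMk1 c := by
      intro s hs
      rcases List.mem_map.mp hs with ⟨i, hi, rfl⟩
      exact hT _ (hmem 0 i hi le_rfl)
    have hO : ∀ s ∈ (PySem.List.pyRange 1 N 2).map (fun i => PySem.List.pyGetD (S.toList.map pvMk1) i ""),
        ∃ c : Char, c.toNat < 128 ∧ s = pvMk1 c := by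
      intro s hs
      rcases List.mem_map.mp hs with ⟨i, hi, rfl⟩
      exact hT _ (hmem 1 i hi (by norm_num))
    rw [sorted_eq_pvBucket _ hE, sorted_eq_pvBucket _ hO]
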